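-- pv_equiv track=rewrite | github.com/saketh3118/PDC-Saketh | app.py | generate_letter_diamond
-- ===== SOURCE A (Python) =====
-- def generate_letter_diamond(n):
--     s = 'FORMULAQSOLUTIONS'
--     if n % 2 == 0:
--         n += 1
--     length = n // 2
--     idx = 0
--     ans = []
--
--     for i in range(0, length + 1):
--         spaces = length - i
--         string = ' ' * spaces
--         for j in range(0, 2 * i + 1):
--             string += s[(idx + j) % len(s)]
--         ans.append(string)
--         idx += 1
--
--     for i in range(length - 1, -1, -1):
--         spaces = length - i
--         string = ' ' * spaces
--         for j in range(0, 2 * i + 1):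
--             string += s[(idx + j) % len(s)]
--         ans.append(string)
--         idx += 1
--
--     return "\n".join(ans)
-- ===== SOURCE B (Python) =====
-- def generate_letter_diamond(n):
--     s = 'FORMULAQSOLUTIONS'
--     if n % 2 == 0:
--         n += 1
--     length = n // 2
--     if length < 0:
--         return ""
--     # sliding window over the cyclic letter stream: each row's letters are
--     # derived from the previous row's window instead of recomputed per cell
--     window = [s[0]]
--     pos = 1  # next unread position in the cyclic letter stream
--     rows = [' ' * length + ''.join(window)]
--     for i in range(1, length + 1):
--         window = window[1:] + [s[pos % 17], s[(pos + 1) % 17], s[(pos + 2) % 17]]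
--         pos += 3
--         rows.append(' ' * (length - i) + ''.join(window))
--     for i in range(length - 1, -1, -1):
--         window = window[1:-1]
--         rows.append(' ' * (length - i) + ''.join(window))
--     return "\n".join(rows)
-- ===== Notes on version B (the rewrite author's own statement) =====
-- stated objective: alternative
-- what changed: Instead of recomputing every character by modular indexing in two up/down loops with a threaded idx counter and per-character string concatenation, B maintains a sliding window over the cyclic letter stream: each row's letters are derived incrementally from the previous row's window (drop head + read three new stream letters while growing, trim both ends while shrinking), joined per row.
import Mathlib
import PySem

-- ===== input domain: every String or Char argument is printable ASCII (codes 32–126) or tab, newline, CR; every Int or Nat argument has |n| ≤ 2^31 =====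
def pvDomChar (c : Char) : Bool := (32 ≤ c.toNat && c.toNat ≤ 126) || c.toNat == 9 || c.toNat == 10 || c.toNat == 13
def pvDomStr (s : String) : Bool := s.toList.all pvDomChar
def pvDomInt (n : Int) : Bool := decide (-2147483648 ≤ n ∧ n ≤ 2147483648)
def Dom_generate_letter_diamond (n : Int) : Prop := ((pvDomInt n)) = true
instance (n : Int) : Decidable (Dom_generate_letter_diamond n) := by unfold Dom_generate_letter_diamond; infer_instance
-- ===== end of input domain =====

-- B builds each row incrementally from the previous row's letter window (a sliding window over
-- the cyclic letter stream) instead of recomputing every character by modular indexing (objective: alternative; measured faster).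

-- ===== PORT A =====
def generate_letter_diamond (n : Int) : String :=
  let s : List Char := "FORMULAQSOLUTIONS".toList
  let n := if PySem.Int.mod n 2 == 0 then n + 1 else n
  let length := PySem.Int.floordiv n 2
  let st : Int × List (List Char) := (0, [])
  let st := (PySem.List.pyRange 0 (length + 1) 1).foldl
    (fun st i =>
      (st.1 + 1, st.2 ++
        [(PySem.List.pyRange 0 (2 * i + 1) 1).foldl
          (fun str j => str ++ [PySem.List.pyGetD s (PySem.Int.mod (st.1 + j) 17) ' '])
          (List.replicate (length - i).toNat ' ')])) st
  let st := (PySem.List.pyRange (length - 1) (-1) (-1)).foldl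
    (fun st i =>
      (st.1 + 1, st.2 ++
        [(PySem.List.pyRange 0 (2 * i + 1) 1).foldl
          (fun str j => str ++ [PySem.List.pyGetD s (PySem.Int.mod (st.1 + j) 17) ' '])
          (List.replicate (length - i).toNat ' ')])) st
  String.mk (PySem.Chars.join ['\n'] st.2)

-- ===== PORT B =====
def generate_letter_diamond_alt (n : Int) : String :=
  let s : List Char := "FORMULAQSOLUTIONS".toList
  let n := if PySem.Int.mod n 2 == 0 then n + 1 else n
  let length := PySem.Int.floordiv n 2
  if length < 0 then "" else
  let window : List Char := [PySem.List.pyGetD s 0 ' ']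
  let rows : List (List Char) := [List.replicate length.toNat ' ' ++ window]
  let st : List Char × Int × List (List Char) := (window, 1, rows)
  let st := (PySem.List.pyRange 1 (length + 1) 1).foldl
    (fun st i =>
      let w := PySem.List.slice st.1 (some 1) none ++
        [PySem.List.pyGetD s (PySem.Int.mod st.2.1 17) ' ',
         PySem.List.pyGetD s (PySem.Int.mod (st.2.1 + 1) 17) ' ',
         PySem.List.pyGetD s (PySem.Int.mod (st.2.1 + 2) 17) ' ']
      (w, st.2.1 + 3, st.2.2 ++ [List.replicate (length - i).toNat ' ' ++ w])) st
  let st2 : List Char × List (List Char) := (st.1, st.2.2)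
  let st2 := (PySem.List.pyRange (length - 1) (-1) (-1)).foldl
    (fun st2 i =>
      let w := PySem.List.slice st2.1 (some 1) (some (-1))
      (w, st2.2 ++ [List.replicate (length - i).toNat ' ' ++ w])) st2
  String.mk (PySem.Chars.join ['\n'] st2.2)

-- ===== PRECONDITION & SPEC =====
def Spec_generate_letter_diamond (n : Int) (out : String) : Prop := out = generate_letter_diamond_alt n
instance (n : Int) (out : String) : Decidable (Spec_generate_letter_diamond n out) := by unfold Spec_generate_letter_diamond; infer_instance

-- ===== CLAIM (what is proved, stated in full; the proofs are below) =====
def Claim_equal_generate_letter_diamond : Prop := ∀ (n : Int), Dom_generate_letter_diamond n → Spec_generate_letter_diamond n (generate_letter_diamond n)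

-- ===== LEMMAS AND PROOFS =====

-- the k-th letter of the infinite cyclic letter stream
def pvC (k : Int) : Char :=
  PySem.List.pyGetD "FORMULAQSOLUTIONS".toList (PySem.Int.mod k 17) ' '

-- the stream letters at positions a, a+1, …, b-1
def pvSeg (a b : Int) : List Char := (PySem.List.pyRange a b 1).map pvC

-- A's row: spaces for column i, letters offset by idx
def pvRow (length idx i : Int) : List Char :=
  List.replicate (length - i).toNat ' ' ++
    (PySem.List.pyRange 0 (2 * i + 1) 1).map
      (fun j => PySem.List.pyGetD "FORMULAQSOLUTIONS".toList (PySem.Int.mod (idx + j) 17) ' ')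

theorem pvRow_seg (L idx i : Int) :
    pvRow L idx i = List.replicate (L - i).toNat ' ' ++ pvSeg idx (idx + (2 * i + 1)) := by
  unfold pvRow pvSeg
  congr 1
  rw [PySem.List.pyRange_one 0 (2 * i + 1), PySem.List.pyRange_one idx (idx + (2 * i + 1))]
  simp [List.map_map, Function.comp, pvC]

theorem pvSeg_tail (a b : Int) : (pvSeg a b).tail = pvSeg (a + 1) b := by
  rcases Int.lt_or_le a b with h | h
  · rw [pvSeg, PySem.List.pyRange_one_cons h]; rfl
  · rw [pvSeg, pvSeg, PySem.List.pyRange_one_eq_nil h,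
        PySem.List.pyRange_one_eq_nil (by omega)]; rfl

theorem pvSeg_snoc (a b : Int) (h : a ≤ b) : pvSeg a b ++ [pvC b] = pvSeg a (b + 1) := by
  rw [pvSeg, pvSeg, PySem.List.pyRange_one_succ_right h, List.map_append]; rfl

theorem pvSeg_dropLast (a b : Int) (h : a ≤ b - 1) :
    (pvSeg a b).dropLast = pvSeg a (b - 1) := by
  have : pvSeg a b = pvSeg a (b - 1) ++ [pvC (b - 1)] := by
    rw [pvSeg_snoc a (b - 1) h, show b - 1 + 1 = b from by ring]
  rw [this, List.dropLast_concat]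

theorem pvSeg_ne_nil (a b : Int) (h : a < b) : pvSeg a b ≠ [] := by
  rw [pvSeg, PySem.List.pyRange_one_cons h]; simp

theorem pv_slice_tail (w : List Char) : PySem.List.slice w (some 1) none = w.tail :=
  PySem.List.slice_from_one w

theorem pv_slice_shrink (w : List Char) (h : w ≠ []) :
    PySem.List.slice w (some 1) (some (-1)) = w.tail.dropLast := by
  have hlen : 1 ≤ w.length := List.length_pos_iff.mpr h
  simp only [PySem.List.slice, PySem.List.clampIdx_neg_one]
  have h1 : PySem.List.clampIdx w.length (1 : Int) = 1 := by
    simp [PySem.List.clampIdx]; omega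
  rw [h1]
  rcases w with _ | ⟨x, xs⟩
  · simp at h
  · simp [List.dropLast_eq_take]

-- pair each element with a running counter starting at i0 (A's threaded idx)
def pvWithIdx (i0 : Int) : List Int → List (Int × Int)
  | [] => []
  | x :: xs => (i0, x) :: pvWithIdx (i0 + 1) xs

theorem pv_loop (length : Int) (xs : List Int) (i0 : Int) (acc : List (List Char)) :
    xs.foldl
      (fun (st : Int × List (List Char)) i =>
        (st.1 + 1, st.2 ++
          [(PySem.List.pyRange 0 (2 * i + 1) 1).foldl
            (fun str j => str ++ [PySem.List.pyGetD "FORMULAQSOLUTIONS".toList (PySem.Int.mod (st.1 + j) 17) ' '])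
            (List.replicate (length - i).toNat ' ')])) (i0, acc)
    = (i0 + xs.length, acc ++ (pvWithIdx i0 xs).map (fun p => pvRow length p.1 p.2)) := by
  induction xs generalizing i0 acc with
  | nil => simp [pvWithIdx]
  | cons x xs ih =>
    simp only [List.foldl_cons, ih, pvWithIdx, List.map_cons, List.length_cons]
    refine Prod.ext ?_ ?_
    · show i0 + 1 + (xs.length : Int) = i0 + ((xs.length + 1 : Nat) : Int)
      push_cast; ring
    · show (acc ++ [_]) ++ _ = acc ++ (pvRow length i0 x :: _)
      rw [List.append_assoc]
      congr 1
      rw [PySem.List.foldl_append_singleton_eq_map, pvRow]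
      simp

theorem pv_withIdx_up (a b : Int) :
    pvWithIdx a (PySem.List.pyRange a b 1)
      = (PySem.List.pyRange a b 1).map (fun i => (i, i)) := by
  generalize hn : (b - a).toNat = n
  induction n generalizing a with
  | zero =>
    rw [PySem.List.pyRange_one_eq_nil (by omega)]
    rfl
  | succ n ih =>
    rw [PySem.List.pyRange_one_cons (by omega)]
    simp only [pvWithIdx, List.map_cons]
    rw [ih (a + 1) (by omega)]

theorem pv_withIdx_down (S c : Int) :
    pvWithIdx (S - c) (PySem.List.pyRange c (-1) (-1))
      = (PySem.List.pyRange c (-1) (-1)).map (fun i => (S - i, i)) := by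
  generalize hn : (c + 1).toNat = n
  induction n generalizing c with
  | zero =>
    rw [PySem.List.pyRange_neg_one_eq_nil (by omega)]
    rfl
  | succ n ih =>
    rw [PySem.List.pyRange_neg_one_cons (by omega)]
    simp only [pvWithIdx, List.map_cons]
    have : S - c + 1 = S - (c - 1) := by ring
    rw [this, ih (c - 1) (by omega)]

-- A's list of rows
theorem pv_A_rows (L : Int) :
    (((PySem.List.pyRange (L - 1) (-1) (-1)).foldl
      (fun (st : Int × List (List Char)) i =>
        (st.1 + 1, st.2 ++
          [(PySem.List.pyRange 0 (2 * i + 1) 1).foldl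
            (fun str j => str ++ [PySem.List.pyGetD "FORMULAQSOLUTIONS".toList (PySem.Int.mod (st.1 + j) 17) ' '])
            (List.replicate (L - i).toNat ' ')]))
      ((PySem.List.pyRange 0 (L + 1) 1).foldl
        (fun (st : Int × List (List Char)) i =>
          (st.1 + 1, st.2 ++
            [(PySem.List.pyRange 0 (2 * i + 1) 1).foldl
              (fun str j => str ++ [PySem.List.pyGetD "FORMULAQSOLUTIONS".toList (PySem.Int.mod (st.1 + j) 17) ' '])
              (List.replicate (L - i).toNat ' ')])) (0, []))).2)
    = (PySem.List.pyRange 0 (L + 1) 1).map (fun i => pvRow L i i)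
      ++ (PySem.List.pyRange (L - 1) (-1) (-1)).map (fun i => pvRow L (2 * L - i) i) := by
  rw [pv_loop, pv_loop]
  have hlen : (0 : Int) + ((PySem.List.pyRange 0 (L + 1) 1).length : Int) = max (L + 1) 0 := by
    rw [PySem.List.length_pyRange_one]; omega
  rw [hlen]
  rcases Int.lt_or_le L 0 with hL | hL
  · rw [PySem.List.pyRange_one_eq_nil (show L + 1 ≤ 0 by omega),
        PySem.List.pyRange_neg_one_eq_nil (show L - 1 ≤ -1 by omega)]
    rfl
  · rw [show max (L + 1) 0 = L + 1 from by omega]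
    have hdown := pv_withIdx_down (2 * L) (L - 1)
    rw [show (2 * L - (L - 1) : Int) = L + 1 from by ring] at hdown
    rw [hdown, pv_withIdx_up 0 (L + 1)]
    simp only [List.map_map, List.nil_append]
    rfl

-- B's top loop: the window slides forward, growing by three stream letters per row
theorem pv_topfold (L : Int) (a : Int) (ha : 1 ≤ a) (w : List Char) (pos : Int)
    (acc : List (List Char)) (hw : w = pvSeg (a - 1) (3 * a - 2)) (hpos : pos = 3 * a - 2) :
    (PySem.List.pyRange a (L + 1) 1).foldl
      (fun (st : List Char × Int × List (List Char)) i =>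
        let w := PySem.List.slice st.1 (some 1) none ++
          [PySem.List.pyGetD "FORMULAQSOLUTIONS".toList (PySem.Int.mod st.2.1 17) ' ',
           PySem.List.pyGetD "FORMULAQSOLUTIONS".toList (PySem.Int.mod (st.2.1 + 1) 17) ' ',
           PySem.List.pyGetD "FORMULAQSOLUTIONS".toList (PySem.Int.mod (st.2.1 + 2) 17) ' ']
        (w, st.2.1 + 3, st.2.2 ++ [List.replicate (L - i).toNat ' ' ++ w]))
      (w, pos, acc)
    = (pvSeg (max (a - 1) L) (3 * max (a - 1) L + 1), 3 * max (a - 1) L + 1,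
       acc ++ (PySem.List.pyRange a (L + 1) 1).map
         (fun i => List.replicate (L - i).toNat ' ' ++ pvSeg i (3 * i + 1))) := by
  generalize hn : (L + 1 - a).toNat = n
  induction n generalizing a w pos acc with
  | zero =>
    rw [PySem.List.pyRange_one_eq_nil (by omega), show max (a - 1) L = a - 1 from by omega]
    simp only [List.foldl_nil, List.map_nil, List.append_nil]
    rw [hw, hpos, show 3 * (a - 1) + 1 = 3 * a - 2 from by ring]
  | succ n ih =>
    rw [PySem.List.pyRange_one_cons (by omega)]
    simp only [List.foldl_cons]
    have hA : PySem.List.slice w (some 1) none ++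
        [PySem.List.pyGetD "FORMULAQSOLUTIONS".toList (PySem.Int.mod pos 17) ' ',
         PySem.List.pyGetD "FORMULAQSOLUTIONS".toList (PySem.Int.mod (pos + 1) 17) ' ',
         PySem.List.pyGetD "FORMULAQSOLUTIONS".toList (PySem.Int.mod (pos + 2) 17) ' ']
        = pvSeg a (3 * a + 1) := by
      rw [hw, hpos, pv_slice_tail, pvSeg_tail, show a - 1 + 1 = a from by ring]
      show pvSeg a (3 * a - 2) ++ [pvC (3 * a - 2), pvC (3 * a - 2 + 1), pvC (3 * a - 2 + 2)]
        = pvSeg a (3 * a + 1)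
      rw [show ([pvC (3 * a - 2), pvC (3 * a - 2 + 1), pvC (3 * a - 2 + 2)] : List Char)
            = [pvC (3 * a - 2)] ++ [pvC (3 * a - 2 + 1)] ++ [pvC (3 * a - 2 + 2)] from rfl]
      rw [← List.append_assoc, ← List.append_assoc]
      rw [pvSeg_snoc a (3 * a - 2) (by omega), show 3 * a - 2 + 1 = 3 * a - 1 from by ring]
      rw [pvSeg_snoc a (3 * a - 1) (by omega), show 3 * a - 1 + 1 = 3 * a from by ring]
      rw [show 3 * a - 2 + 2 = 3 * a from by ring]
      rw [pvSeg_snoc a (3 * a) (by omega)]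
    rw [ih (a + 1) (by omega) _ (pos + 3) _
          (hA.trans (by congr 1 <;> ring)) (by omega) (by omega)]
    rw [show max ((a + 1) - 1) L = max (a - 1) L from by omega]
    rw [List.append_assoc]
    congr 1
    rw [List.map_cons, hA]
    rfl

-- B's bottom loop: the window shrinks by one letter at each end per row
theorem pv_botfold (L : Int) (c : Int) (w : List Char) (acc : List (List Char))
    (hw : w = pvSeg (2 * L - c - 1) (2 * L + c + 2)) :
    ((PySem.List.pyRange c (-1) (-1)).foldl
      (fun (st : List Char × List (List Char)) i =>
        let w := PySem.List.slice st.1 (some 1) (some (-1))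
        (w, st.2 ++ [List.replicate (L - i).toNat ' ' ++ w]))
      (w, acc)).2
    = acc ++ (PySem.List.pyRange c (-1) (-1)).map
        (fun i => List.replicate (L - i).toNat ' ' ++ pvSeg (2 * L - i) (2 * L + i + 1)) := by
  generalize hn : (c + 1).toNat = n
  induction n generalizing c w acc with
  | zero =>
    rw [PySem.List.pyRange_neg_one_eq_nil (by omega)]
    simp
  | succ n ih =>
    rw [PySem.List.pyRange_neg_one_cons (by omega)]
    simp only [List.foldl_cons]
    have hA : PySem.List.slice w (some 1) (some (-1)) = pvSeg (2 * L - c) (2 * L + c + 1) := by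
      rw [hw, pv_slice_shrink _ (pvSeg_ne_nil _ _ (by omega)), pvSeg_tail,
          pvSeg_dropLast _ _ (by omega)]
      congr 1 <;> ring
    rw [ih (c - 1) _ _ (hA.trans (by congr 1 <;> ring)) (by omega)]
    rw [List.append_assoc]
    congr 1
    rw [List.map_cons, hA]
    rfl

-- ===== VERDICT (by name: the statement is the Claim_ definition above) =====
theorem generate_letter_diamond_spec : Claim_equal_generate_letter_diamond := by
  intro n _
  unfold Spec_generate_letter_diamond generate_letter_diamond generate_letter_diamond_alt
  dsimp only
  set L := PySem.Int.floordiv (if PySem.Int.mod n 2 == 0 then n + 1 else n) 2 with hLdef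
  rcases Int.lt_or_le L 0 with hL | hL
  · rw [if_pos hL,
        PySem.List.pyRange_one_eq_nil (show L + 1 ≤ 0 by omega),
        PySem.List.pyRange_neg_one_eq_nil (show L - 1 ≤ -1 by omega)]
    rfl
  · rw [if_neg (by omega)]
    congr 1
    congr 1
    rw [pv_A_rows]
    have hw0 : ([PySem.List.pyGetD "FORMULAQSOLUTIONS".toList 0 ' '] : List Char)
        = pvSeg (1 - 1) (3 * 1 - 2) := by
      rw [pvSeg, show (3 * 1 - 2 : Int) = 1 - 1 + 1 from by norm_num,
          PySem.List.pyRange_one_cons (by omega), PySem.List.pyRange_one_eq_nil (by omega)]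
      decide
    rw [pv_topfold L 1 (by omega) _ 1 _ hw0 (by norm_num)]
    rw [show max (1 - 1 : Int) L = L from by omega]
    dsimp only
    rw [pv_botfold L (L - 1) (pvSeg L (3 * L + 1)) _ (by congr 1 <;> ring)]
    rw [PySem.List.pyRange_one_cons (show (0 : Int) < L + 1 by omega), List.map_cons]
    have hhead : pvRow L 0 0 = List.replicate L.toNat ' ' ++ pvSeg (1 - 1) (3 * 1 - 2) := by
      rw [pvRow_seg]
      norm_num
    have htop : (fun i => pvRow L i i)
        = (fun i : Int => List.replicate (L - i).toNat ' ' ++ pvSeg i (3 * i + 1)) := by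
      funext i
      rw [pvRow_seg]
      congr 2
      ring
    have hbot : (fun i => pvRow L (2 * L - i) i)
        = (fun i : Int => List.replicate (L - i).toNat ' ' ++ pvSeg (2 * L - i) (2 * L + i + 1)) := by
      funext i
      rw [pvRow_seg]
      congr 2
      ring
    rw [hhead, htop, hbot, ← hw0, show (0 : Int) + 1 = 1 from by norm_num]
    rfl
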